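-- pv_equiv track=rewrite | github.com/Rise-fei/python-code | 算法/3.leetcode/_828统计字符串中的唯一字符.py | countUniqueChars
-- ===== SOURCE A (Python) =====
-- def countUniqueChars(s):
--     s_l = len(s)
--     step = 1
--     total = 0
--     sub_mapping = dict()
--     sub_mapping[""] = 0
--     sub_str_list = []
--     record = []
--     while step <= s_l:
--         start = 0
--         end = start + step
--         while end <= s_l:
--             sub_str = s[start:end]
--             sub_str_list.append(sub_str)
--             if value := sub_mapping.get(sub_str):
--                 total += value
--                 record.append(f"{sub_str}:{value}")
--             else:
--                 s2 = sub_str[:-1]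
--                 c = sub_str[-1]
--                 value = sub_mapping.get(s2)
--                 if c in s2:
--                     if c in s2.replace(c, "", 1):
--                         cur_value = value
--                     else:
--                         cur_value = value - 1
--                     total += cur_value
--
--                 else:
--                     cur_value = value + 1
--                     total += cur_value
--                 record.append(f"{sub_str}:{cur_value}")
--                 sub_mapping[sub_str] = cur_value
--             start += 1
--             end = start + step
--         step += 1
--     return total
-- ===== SOURCE B (Python) =====
-- def countUniqueChars(s):
--     # For each start, extend the substring one char at a time, maintaining a
--     # character counter and the current number of unique chars incrementally.
--     n = len(s)
--     total = 0
--     for start in range(n):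
--         counts = {}
--         uniq = 0
--         for i in range(start, n):
--             c = s[i]
--             k = counts.get(c, 0)
--             if k == 0:
--                 uniq += 1
--             elif k == 1:
--                 uniq -= 1
--             counts[c] = k + 1
--             total += uniq
--     return total
-- ===== Notes on version B (the rewrite author's own statement) =====
-- stated objective: faster
-- what changed: Replaced A's substring-memo dict (building every substring, hashing it, and scanning it with 'in'/'replace') by a per-start sweep that extends the window one character at a time and updates a character counter and the unique count incrementally.
import Mathlib
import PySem

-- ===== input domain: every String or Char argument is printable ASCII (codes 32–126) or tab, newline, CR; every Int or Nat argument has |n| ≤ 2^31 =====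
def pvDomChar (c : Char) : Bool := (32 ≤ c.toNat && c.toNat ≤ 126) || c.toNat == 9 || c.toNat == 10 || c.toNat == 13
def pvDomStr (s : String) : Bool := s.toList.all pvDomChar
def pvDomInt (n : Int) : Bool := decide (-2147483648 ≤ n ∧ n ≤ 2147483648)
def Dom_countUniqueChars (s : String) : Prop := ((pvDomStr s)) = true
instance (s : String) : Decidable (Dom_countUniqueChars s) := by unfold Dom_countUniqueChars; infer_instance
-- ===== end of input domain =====

-- B replaces A's substring-memo dict by a per-start incremental window sweep; measured faster (asymptotic: no substring is ever materialised or scanned).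

-- ===== PORT A =====
-- A's loop state is (total, sub_mapping, sub_str_list, record); the last two never influence the result
-- but are carried faithfully.  'c in s2' for the single character c is List.contains, and
-- s2.replace(c, "", 1) for a single character c removes its first occurrence, i.e. List.erase — both exact.
-- 'sub_mapping.get(s2)' is ported as get? + getD 0: s2 (a substring of length step-1, or "") is always
-- a key at that point, so Python's None never reaches the arithmetic.
def pvAElse (total : Int) (m : PySem.Dict (List Char) Int)
    (lst rcd : List (List Char)) (sub : List Char) :
    Int × PySem.Dict (List Char) Int × List (List Char) × List (List Char) :=
  let s2 := PySem.List.slice sub none (some (-1))          -- sub_str[:-1]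
  let c := PySem.List.pyGetD sub (-1) ' '                  -- sub_str[-1]; sub is never empty
  let value := (m.get? s2).getD 0
  let cur := if s2.contains c then (if (s2.erase c).contains c then value else value - 1)
             else value + 1
  (total + cur, m.insert sub cur, lst, rcd ++ [sub ++ ':' :: PySem.Int.toChars cur])

def pvAStep (cs : List Char) (step : Int)
    (st : Int × PySem.Dict (List Char) Int × List (List Char) × List (List Char))
    (start : Int) :
    Int × PySem.Dict (List Char) Int × List (List Char) × List (List Char) :=
  let (total, m, lst, rcd) := st
  let sub := PySem.List.slice cs (some start) (some (start + step))
  let lst := lst ++ [sub]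
  -- walrus 'if value := sub_mapping.get(sub_str)': taken iff the key is present with a nonzero value
  match m.get? sub with
  | some v =>
      if v ≠ 0 then (total + v, m, lst, rcd ++ [sub ++ ':' :: PySem.Int.toChars v])
      else pvAElse total m lst rcd sub
  | none => pvAElse total m lst rcd sub

def countUniqueChars (s : String) : Int :=
  let cs := s.toList
  let sl := PySem.Chars.len cs
  ((PySem.List.pyRange 1 (sl + 1) 1).foldl
    (fun st step => (PySem.List.pyRange 0 (sl - step + 1) 1).foldl (pvAStep cs step) st)
    (0, (PySem.Dict.empty : PySem.Dict (List Char) Int).insert [] 0, [], [])).1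

-- ===== PORT B =====
def pvBStep (cs : List Char) (st : Int × Int × PySem.Dict Char Int) (i : Int) :
    Int × Int × PySem.Dict Char Int :=
  let (total, uniq, counts) := st
  let c := PySem.List.pyGetD cs i ' '                      -- s[i]; i is always in range
  let k := counts.getD c 0
  let uniq' := if k = 0 then uniq + 1 else if k = 1 then uniq - 1 else uniq
  (total + uniq', uniq', counts.insert c (k + 1))

def countUniqueChars_alt (s : String) : Int :=
  let cs := s.toList
  let n := PySem.Chars.len cs
  (PySem.List.pyRange 0 n 1).foldl
    (fun total start =>
      ((PySem.List.pyRange start n 1).foldl (pvBStep cs) (total, 0, PySem.Dict.empty)).1)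
    0

-- ===== PRECONDITION & SPEC =====
def Spec_countUniqueChars (s : String) (out : Int) : Prop := out = countUniqueChars_alt s
instance (s : String) (out : Int) : Decidable (Spec_countUniqueChars s out) := by unfold Spec_countUniqueChars; infer_instance

-- ===== CLAIM (what is proved, stated in full; the proofs are below) =====
def Claim_equal_countUniqueChars : Prop := ∀ (s : String), Dom_countUniqueChars s → Spec_countUniqueChars s (countUniqueChars s)

-- ===== LEMMAS AND PROOFS =====

def pvU (t : List Char) : Int := ((t.filter (fun x => t.count x == 1)).length : Int)

lemma pvFiltNe (l : List Char) (c : Char) :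
    (l.filter (fun x => !(x == c))).length + l.count c = l.length := by
  induction l with
  | nil => simp
  | cons x xs ih =>
    simp only [List.filter_cons, List.count_cons]
    by_cases hx : x = c
    · subst hx; simp; omega
    · simp [hx]; omega

lemma pvU_append (t : List Char) (c : Char) :
    pvU (t ++ [c]) = pvU t + (if t.count c = 0 then 1 else if t.count c = 1 then -1 else 0) := by
  unfold pvU
  rw [List.filter_append]
  have h1 : List.filter (fun x => (t ++ [c]).count x == 1) t
      = List.filter (fun a => !(a == c) && (t.count a == 1)) t := by
    apply List.filter_congr
    intro x hx
    by_cases hxc : x = c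
    · subst hxc
      have : 1 ≤ t.count x := List.count_pos_iff.mpr hx
      simp [List.count_append]
      omega
    · simp [List.count_append, List.count_singleton, hxc, Ne.symm hxc]
  have h2 : List.filter (fun x => (t ++ [c]).count x == 1) [c]
      = if t.count c = 0 then [c] else [] := by
    by_cases h0 : t.count c = 0
    · simp [List.count_append, h0]
    · simp [List.count_append, h0]
  rw [h1, h2, ← List.filter_filter]
  have h3 := pvFiltNe (t.filter (fun x => t.count x == 1)) c
  have h4 : (t.filter (fun x => t.count x == 1)).count c
      = if t.count c = 1 then 1 else 0 := by
    by_cases hq : t.count c = 1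
    · rw [List.count_filter (by simp [hq])]; simp [hq]
    · simp [hq]
      rw [List.count_eq_zero]
      intro hmem
      have := (List.mem_filter.mp hmem).2
      simp at this; omega
  rw [h4] at h3
  rw [List.length_append]
  split_ifs with h0 hc1
  · simp [h0] at h3; simp; omega
  · simp [h0, hc1] at h3; simp; omega
  · simp [h0, hc1] at h3; simp; omega

lemma pvU_append_mem (t : List Char) (c : Char) :
    pvU (t ++ [c]) = (if t.contains c then (if (t.erase c).contains c then pvU t else pvU t - 1)
                      else pvU t + 1) := by
  rw [pvU_append]
  by_cases hmem : c ∈ t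
  · have hc1 : 1 ≤ t.count c := List.count_pos_iff.mpr hmem
    by_cases hmem2 : c ∈ t.erase c
    · have h2 : 0 < (t.erase c).count c := List.count_pos_iff.mpr hmem2
      rw [List.count_erase_self] at h2
      simp [List.contains_iff_mem, hmem, hmem2, show ¬ t.count c = 0 by omega,
        show ¬ t.count c = 1 by omega]
    · have h2 : (t.erase c).count c = 0 := List.count_eq_zero.mpr hmem2
      rw [List.count_erase_self] at h2
      simp [List.contains_iff_mem, hmem, hmem2, show ¬ t.count c = 0 by omega,
        show t.count c = 1 by omega]
      omega
  · have h0 : t.count c = 0 := List.count_eq_zero.mpr hmem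
    simp [List.contains_iff_mem, hmem, h0]

def pvSeg (cs : List Char) (l len : Nat) : List Char := (cs.drop l).take len

lemma pvSeg_succ (cs : List Char) (l p : Nat) (h : l + p < cs.length) :
    pvSeg cs l (p + 1) = pvSeg cs l p ++ [cs[l + p]] := by
  unfold pvSeg
  rw [List.take_add_one]
  have hp : p < (cs.drop l).length := by simp; omega
  rw [List.getElem?_eq_getElem hp]
  simp [List.getElem_drop]

def pvGood (m : PySem.Dict (List Char) Int) : Prop := ∀ t v, m.get? t = some v → v = pvU t

lemma pvAStep_eq (cs : List Char) (step : Nat) (hstep : 1 ≤ step) (start : Nat)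
    (hs : start + step ≤ cs.length) (total : Int) (m : PySem.Dict (List Char) Int)
    (lst rcd : List (List Char)) (hm : pvGood m)
    (hkey : (m.get? (pvSeg cs start (step - 1))).isSome) :
    ∃ m' lst' rcd',
      pvAStep cs (step : Int) (total, m, lst, rcd) (start : Int)
        = (total + pvU (pvSeg cs start step), m', lst', rcd')
      ∧ pvGood m' ∧ (∀ t, (m.get? t).isSome → (m'.get? t).isSome)
      ∧ (m'.get? (pvSeg cs start step)).isSome := by
  have hsub : PySem.List.slice cs (some (start : Int)) (some ((start : Int) + (step : Int)))
      = pvSeg cs start step := PySem.List.slice_natCast_add cs start step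
  have hsegsucc : pvSeg cs start step = pvSeg cs start (step - 1) ++ [cs[start + (step - 1)]] := by
    have := pvSeg_succ cs start (step - 1) (by omega)
    rw [show step - 1 + 1 = step from by omega] at this
    exact this
  have hdl : (pvSeg cs start step).dropLast = pvSeg cs start (step - 1) := by
    rw [hsegsucc, List.dropLast_concat]
  have hlast : PySem.List.pyGetD (pvSeg cs start step) (-1) ' ' = cs[start + (step - 1)] := by
    rw [hsegsucc]
    exact PySem.List.pyGetD_neg_one_append_singleton _ _ _
  -- value of the else branch
  obtain ⟨w, hw⟩ := Option.isSome_iff_exists.mp hkey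
  have hwU : w = pvU (pvSeg cs start (step - 1)) := hm _ _ hw
  have helse : ∀ (lst2 rcd2 : List (List Char)), pvAElse total m lst2 rcd2 (pvSeg cs start step)
      = (total + pvU (pvSeg cs start step),
         m.insert (pvSeg cs start step) (pvU (pvSeg cs start step)),
         lst2, rcd2 ++ [pvSeg cs start step ++ ':' :: PySem.Int.toChars (pvU (pvSeg cs start step))]) := by
    intro lst2 rcd2
    simp only [pvAElse]
    rw [PySem.List.slice_to_neg_one, hdl, hlast, hw]
    have hcur : (if (pvSeg cs start (step - 1)).contains cs[start + (step - 1)] then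
          (if ((pvSeg cs start (step - 1)).erase cs[start + (step - 1)]).contains cs[start + (step - 1)]
            then (some w).getD 0 else (some w).getD 0 - 1)
          else (some w).getD 0 + 1) = pvU (pvSeg cs start step) := by
      rw [hsegsucc, pvU_append_mem]
      simp [hwU]
    rw [hcur]
  have hgood' : pvGood (m.insert (pvSeg cs start step) (pvU (pvSeg cs start step))) := by
    intro t v hv
    by_cases ht : t = pvSeg cs start step
    · subst ht; rw [PySem.Dict.get?_insert_self] at hv; exact (Option.some.inj hv).symm
    · rw [PySem.Dict.get?_insert_of_ne _ _ ht] at hv; exact hm _ _ hv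
  have hmono : ∀ t, (m.get? t).isSome = true →
      ((m.insert (pvSeg cs start step) (pvU (pvSeg cs start step))).get? t).isSome = true := by
    intro t ht
    by_cases h' : t = pvSeg cs start step
    · subst h'; rw [PySem.Dict.get?_insert_self]; rfl
    · rw [PySem.Dict.get?_insert_of_ne _ _ h']; exact ht
  simp only [pvAStep, hsub]
  cases h : m.get? (pvSeg cs start step) with
  | none =>
    dsimp only
    exact ⟨_, _, _, helse _ _, hgood', hmono, by rw [PySem.Dict.get?_insert_self]; rfl⟩
  | some v =>
    dsimp only
    by_cases hv : v = 0
    · subst hv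
      rw [if_neg (by simp)]
      exact ⟨_, _, _, helse _ _, hgood', hmono, by rw [PySem.Dict.get?_insert_self]; rfl⟩
    · rw [if_pos hv]
      have hvU : v = pvU (pvSeg cs start step) := hm _ _ h
      exact ⟨m, _, _, by rw [hvU], hm, fun t ht => ht, by rw [h]; rfl⟩

lemma pvAInner (cs : List Char) (step : Nat) (hstep : 1 ≤ step) :
    ∀ (d j : Nat) (total : Int) (m : PySem.Dict (List Char) Int)
      (lst rcd : List (List Char)) (b : Int),
      b = ((j + d : Nat) : Int) → j + d + step = cs.length + 1 →
      pvGood m →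
      (∀ l : Nat, l + step ≤ cs.length + 1 → (m.get? (pvSeg cs l (step - 1))).isSome) →
      (∀ l : Nat, l < j → (m.get? (pvSeg cs l step)).isSome) →
      ∃ m' lst' rcd',
        ((PySem.List.pyRange (j : Int) b 1).foldl (pvAStep cs (step : Int)) (total, m, lst, rcd))
          = (total + ((List.range d).map (fun t => pvU (pvSeg cs (j + t) step))).sum, m', lst', rcd')
        ∧ pvGood m' ∧ (∀ t, (m.get? t).isSome → (m'.get? t).isSome)
        ∧ (∀ l : Nat, l < j + d → (m'.get? (pvSeg cs l step)).isSome) := by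
  intro d
  induction d with
  | zero =>
    intro j total m lst rcd b hb hlen hg hall hpart
    subst hb
    rw [PySem.List.pyRange_one_eq_nil (by simp)]
    exact ⟨m, lst, rcd, by simp, hg, fun t ht => ht, fun l hl => hpart l (by omega)⟩
  | succ d ih =>
    intro j total m lst rcd b hb hlen hg hall hpart
    subst hb
    rw [PySem.List.pyRange_one_cons (by push_cast; omega), List.foldl_cons]
    obtain ⟨m1, lst1, rcd1, hstep1, hg1, hmono1, hkey1⟩ :=
      pvAStep_eq cs step hstep j (by omega) total m lst rcd hg (hall j (by omega))
    rw [hstep1, show (j : Int) + 1 = ((j + 1 : Nat) : Int) from by push_cast; ring,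
      show ((j + (d + 1) : Nat) : Int) = (((j + 1) + d : Nat) : Int) from by push_cast; ring]
    obtain ⟨m', lst', rcd', hfold, hg', hmono', hpart'⟩ :=
      ih (j + 1) (total + pvU (pvSeg cs j step)) m1 lst1 rcd1 (((j + 1) + d : Nat) : Int) rfl
        (by omega) hg1
        (fun l hl => hmono1 _ (hall l hl))
        (fun l hl => by
          rcases Nat.lt_or_ge l j with h' | h'
          · exact hmono1 _ (hpart l h')
          · have hlj : l = j := by omega
            subst hlj; exact hkey1)
    rw [hfold]
    refine ⟨m', lst', rcd', ?_, hg', fun t ht => hmono' _ (hmono1 _ ht),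
      fun l hl => hpart' l (by omega)⟩
    rw [List.range_succ_eq_map, List.map_cons, List.sum_cons, List.map_map]
    rw [List.map_congr_left (l := List.range d)
      (f := (fun t => pvU (pvSeg cs (j + t) step)) ∘ Nat.succ)
      (g := fun t => pvU (pvSeg cs (j + 1 + t) step))
      (fun t _ => by simp [Function.comp]; rw [show j + (t + 1) = j + 1 + t from by omega])]
    rw [add_assoc]; norm_num

lemma pvAOuter (cs : List Char) :
    ∀ (d step : Nat), 1 ≤ step → step + d = cs.length + 1 →
    ∀ (total : Int) (m : PySem.Dict (List Char) Int) (lst rcd : List (List Char)),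
      pvGood m →
      (∀ l : Nat, l + step ≤ cs.length + 1 → (m.get? (pvSeg cs l (step - 1))).isSome) →
      ((PySem.List.pyRange (step : Int) ((cs.length : Int) + 1) 1).foldl
        (fun st stp => (PySem.List.pyRange 0 ((cs.length : Int) - stp + 1) 1).foldl (pvAStep cs stp) st)
        (total, m, lst, rcd)).1
      = total + ((List.range d).map (fun t =>
          ((List.range (cs.length + 1 - (step + t))).map
            (fun l => pvU (pvSeg cs l (step + t)))).sum)).sum := by
  intro d
  induction d with
  | zero =>
    intro step h1 h2 total m lst rcd hg hall
    rw [PySem.List.pyRange_one_eq_nil (by push_cast; omega)]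
    simp
  | succ d ih =>
    intro step h1 h2 total m lst rcd hg hall
    rw [PySem.List.pyRange_one_cons (by push_cast; omega), List.foldl_cons]
    obtain ⟨m', lst', rcd', hfold, hg', hmono', hpart'⟩ :=
      pvAInner cs step h1 (cs.length + 1 - step) 0 total m lst rcd
        ((cs.length : Int) - (step : Int) + 1) (by push_cast; omega) (by omega) hg hall
        (fun l hl => by omega)
    simp only [Nat.cast_zero, Nat.zero_add, zero_add] at hfold
    rw [hfold, show (step : Int) + 1 = ((step + 1 : Nat) : Int) from by push_cast; ring]
    rw [ih (step + 1) (by omega) (by omega) _ m' lst' rcd' hg'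
      (fun l hl => by
        have : l < 0 + (cs.length + 1 - step) := by omega
        simpa using hpart' l this)]
    rw [List.range_succ_eq_map, List.map_cons, List.sum_cons, List.map_map]
    rw [List.map_congr_left (l := List.range d)
      (f := (fun t => ((List.range (cs.length + 1 - (step + t))).map
          (fun l => pvU (pvSeg cs l (step + t)))).sum) ∘ Nat.succ)
      (g := fun t => ((List.range (cs.length + 1 - (step + 1 + t))).map
          (fun l => pvU (pvSeg cs l (step + 1 + t)))).sum)
      (fun t _ => by simp [Function.comp]; rw [show step + (t + 1) = step + 1 + t from by omega])]
    rw [add_assoc]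
    norm_num

lemma pvA_total (s : String) :
    countUniqueChars s
      = ((List.range s.toList.length).map (fun t =>
          ((List.range (s.toList.length - t)).map
            (fun l => pvU (pvSeg s.toList l (t + 1)))).sum)).sum := by
  have hgood : pvGood ((PySem.Dict.empty : PySem.Dict (List Char) Int).insert [] 0) := by
    intro t v hv
    by_cases ht : t = []
    · subst ht; rw [PySem.Dict.get?_insert_self] at hv
      simp [pvU, (Option.some.inj hv).symm]
    · rw [PySem.Dict.get?_insert_of_ne _ _ ht, PySem.Dict.get?_empty] at hv
      exact absurd hv (by simp)
  have hall : ∀ l : Nat, l + 1 ≤ s.toList.length + 1 →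
      ((((PySem.Dict.empty : PySem.Dict (List Char) Int).insert [] 0)).get?
        (pvSeg s.toList l (1 - 1))).isSome = true := by
    intro l _
    have : pvSeg s.toList l (1 - 1) = [] := by simp [pvSeg]
    rw [this, PySem.Dict.get?_insert_self]; rfl
  have h := pvAOuter s.toList s.toList.length 1 (by omega) (by omega) 0
    ((PySem.Dict.empty : PySem.Dict (List Char) Int).insert [] 0) [] [] hgood hall
  rw [show ((1 : Nat) : Int) = (1 : Int) from by norm_num] at h
  simp only [countUniqueChars, PySem.Chars.len_eq]
  rw [h, zero_add]
  congr 1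
  apply List.map_congr_left
  intro t _
  rw [show s.toList.length + 1 - (1 + t) = s.toList.length - t from by omega,
    show 1 + t = t + 1 from by omega]

def pvCnt (counts : PySem.Dict Char Int) (pref : List Char) : Prop :=
  ∀ x, counts.getD x 0 = (pref.count x : Int)

lemma pvBInner (cs : List Char) (l : Nat) :
    ∀ (d p : Nat) (total uniq : Int) (counts : PySem.Dict Char Int),
      l + p + d = cs.length →
      uniq = pvU (pvSeg cs l p) → pvCnt counts (pvSeg cs l p) →
      ((PySem.List.pyRange ((l + p : Nat) : Int) ((cs.length : Nat) : Int) 1).foldl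
        (pvBStep cs) (total, uniq, counts)).1
      = total + ((List.range d).map (fun t => pvU (pvSeg cs l (p + t + 1)))).sum := by
  intro d
  induction d with
  | zero =>
    intro p total uniq counts hd hu hc
    rw [PySem.List.pyRange_one_eq_nil (by push_cast; omega)]
    simp
  | succ d ih =>
    intro p total uniq counts hd hu hc
    rw [PySem.List.pyRange_one_cons (by push_cast; omega), List.foldl_cons]
    have hlp : l + p < cs.length := by omega
    have hch : PySem.List.pyGetD cs ((l + p : Nat) : Int) ' ' = cs[l + p] := by
      rw [PySem.List.pyGetD_natCast]
      exact List.getD_eq_getElem _ _ (by omega)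
    have hseg : pvSeg cs l p ++ [cs[l + p]] = pvSeg cs l (p + 1) :=
      (pvSeg_succ cs l p hlp).symm
    have hstep : pvBStep cs (total, uniq, counts) ((l + p : Nat) : Int)
        = (total + pvU (pvSeg cs l (p + 1)), pvU (pvSeg cs l (p + 1)),
           counts.insert cs[l + p] (counts.getD cs[l + p] 0 + 1)) := by
      simp only [pvBStep, hch]
      have hk := hc cs[l + p]
      have huniq : (if counts.getD cs[l + p] 0 = 0 then uniq + 1
          else if counts.getD cs[l + p] 0 = 1 then uniq - 1 else uniq)
          = pvU (pvSeg cs l (p + 1)) := by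
        rw [← hseg, pvU_append, hu, hk]
        by_cases h0 : (pvSeg cs l p).count cs[l + p] = 0 <;>
          by_cases h1 : (pvSeg cs l p).count cs[l + p] = 1 <;>
          simp [h0, h1] <;> try ring
      rw [huniq]
    rw [hstep, show ((l + p : Nat) : Int) + 1 = ((l + (p + 1) : Nat) : Int) from by push_cast; ring]
    have hcnt' : pvCnt (counts.insert cs[l + p] (counts.getD cs[l + p] 0 + 1)) (pvSeg cs l (p + 1)) := by
      intro x
      rw [← hseg]
      by_cases hx : x = cs[l + p]
      · subst hx
        rw [PySem.Dict.getD_insert_self, hc _]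
        simp [List.count_append]
      · rw [PySem.Dict.getD_insert_of_ne _ _ _ hx, hc x]
        simp [List.count_append, List.count_singleton, Ne.symm hx]
    rw [ih (p + 1) (total + pvU (pvSeg cs l (p + 1))) _ _ (by omega) rfl hcnt']
    rw [List.range_succ_eq_map, List.map_cons, List.sum_cons, List.map_map]
    rw [List.map_congr_left (l := List.range d)
      (f := (fun t => pvU (pvSeg cs l (p + t + 1))) ∘ Nat.succ)
      (g := fun t => pvU (pvSeg cs l (p + 1 + t + 1)))
      (fun t _ => by simp [Function.comp]; rw [show p + (t + 1) + 1 = p + 1 + t + 1 from by omega])]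
    rw [add_assoc]

lemma pvBOuter (cs : List Char) :
    ∀ (d j : Nat), j + d = cs.length →
    ∀ (total : Int),
      ((PySem.List.pyRange (j : Int) ((cs.length : Nat) : Int) 1).foldl
        (fun total start =>
          ((PySem.List.pyRange start ((cs.length : Nat) : Int) 1).foldl (pvBStep cs)
            (total, 0, PySem.Dict.empty)).1)
        total)
      = total + ((List.range d).map (fun t =>
          ((List.range (cs.length - (j + t))).map
            (fun k => pvU (pvSeg cs (j + t) (k + 1)))).sum)).sum := by
  intro d
  induction d with
  | zero =>
    intro j hj total
    rw [PySem.List.pyRange_one_eq_nil (by push_cast; omega)]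
    simp
  | succ d ih =>
    intro j hj total
    rw [PySem.List.pyRange_one_cons (by push_cast; omega), List.foldl_cons]
    have hin := pvBInner cs j (cs.length - j) 0 total 0 PySem.Dict.empty (by omega)
      (by simp [pvU, pvSeg]) (by intro x; simp [pvSeg, PySem.Dict.getD_empty])
    rw [show ((j + 0 : Nat) : Int) = (j : Int) from by norm_num] at hin
    rw [hin, show (j : Int) + 1 = ((j + 1 : Nat) : Int) from by push_cast; ring]
    rw [ih (j + 1) (by omega)]
    rw [List.range_succ_eq_map, List.map_cons, List.sum_cons, List.map_map]
    rw [List.map_congr_left (l := List.range d)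
      (f := (fun t => ((List.range (cs.length - (j + t))).map
          (fun k => pvU (pvSeg cs (j + t) (k + 1)))).sum) ∘ Nat.succ)
      (g := fun t => ((List.range (cs.length - (j + 1 + t))).map
          (fun k => pvU (pvSeg cs (j + 1 + t) (k + 1)))).sum)
      (fun t _ => by simp [Function.comp]; rw [show j + (t + 1) = j + 1 + t from by omega])]
    rw [add_assoc]
    norm_num

lemma pvB_total (s : String) :
    countUniqueChars_alt s
      = ((List.range s.toList.length).map (fun t =>
          ((List.range (s.toList.length - t)).map
            (fun k => pvU (pvSeg s.toList t (k + 1)))).sum)).sum := by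
  have h := pvBOuter s.toList s.toList.length 0 (by omega) 0
  rw [show ((0 : Nat) : Int) = (0 : Int) from by norm_num] at h
  simp only [countUniqueChars_alt, PySem.Chars.len_eq]
  rw [h, zero_add]
  congr 1
  apply List.map_congr_left
  intro t _
  rw [show 0 + t = t from by omega]

lemma pvTriangle (n : Nat) (F : Nat → Nat → Int) :
    ((List.range n).map (fun s => ((List.range (n - s)).map (fun t => F s t)).sum)).sum
      = ((List.range n).map (fun t => ((List.range (n - t)).map (fun s => F s t)).sum)).sum := by
  have bridge : ∀ (G : Nat → Nat → Int),
      ((List.range n).map (fun s => ((List.range (n - s)).map (fun t => G s t)).sum)).sum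
        = ∑ s ∈ Finset.range n, ∑ t ∈ Finset.range (n - s), G s t := fun G => rfl
  have expand : ∀ (G : Nat → Nat → Int) (s : Nat),
      ∑ t ∈ Finset.range (n - s), G s t
        = ∑ t ∈ Finset.range n, if s + t < n then G s t else 0 := by
    intro G s
    rw [← Finset.sum_filter]
    apply Finset.sum_congr
    · ext t; simp; omega
    · intro t _; rfl
  rw [bridge F, bridge (fun t s => F s t)]
  calc ∑ s ∈ Finset.range n, ∑ t ∈ Finset.range (n - s), F s t
      = ∑ s ∈ Finset.range n, ∑ t ∈ Finset.range n, if s + t < n then F s t else 0 :=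
        Finset.sum_congr rfl (fun s _ => expand F s)
    _ = ∑ t ∈ Finset.range n, ∑ s ∈ Finset.range n, if s + t < n then F s t else 0 :=
        Finset.sum_comm
    _ = ∑ t ∈ Finset.range n, ∑ s ∈ Finset.range (n - t), F s t := by
        refine Finset.sum_congr rfl (fun t _ => ?_)
        rw [expand (fun t s => F s t) t]
        refine Finset.sum_congr rfl (fun s _ => ?_)
        rw [Nat.add_comm t s]

-- ===== VERDICT (by name: the statement is the Claim_ definition above) =====
theorem countUniqueChars_spec : Claim_equal_countUniqueChars := by
  intro s _
  unfold Spec_countUniqueChars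
  rw [pvA_total, pvB_total,
    pvTriangle s.toList.length (fun t l => pvU (pvSeg s.toList l (t + 1)))]
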